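-- pv_equiv track=rewrite | github.com/Garrett-Bogart/WebScrapping | monster.py | repair_actions
-- ===== SOURCE A (Python) =====
-- def repair_actions(action_parts):#occurs if action's description contain commas
-- 	repaired_actions = []
-- 	for i in range(len(action_parts)):
-- 		temp= action_parts[i].split(':')
-- 		if len(temp) < 2:
-- 			size = len(repaired_actions)
-- 			patching = repaired_actions[size-1]+","+temp[0]
-- 			repaired_actions[size-1]=patching
-- 		else:
-- 			repaired_actions.append(action_parts[i])
-- 	return repaired_actions
-- ===== SOURCE B (Python) =====
-- def repair_actions(action_parts):
--     # right-to-left pass: collect trailing comma fragments until the 'name:desc'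
--     # part that owns them is reached, then emit the rejoined entry
--     result = []
--     pending = []
--     for part in reversed(action_parts):
--         if ":" in part:
--             result.append(",".join([part] + pending))
--             pending = []
--         else:
--             pending = [part] + pending
--     if pending:
--         # comma fragments before the first 'name:description' part: malformed input
--         raise ValueError("fragment with no preceding 'name:description' part")
--     result.reverse()
--     return result
-- ===== Notes on version B (the rewrite author's own statement) =====
-- stated objective: alternative
-- what changed: A scans left-to-right and repeatedly patches the last emitted entry by string re-concatenation; B scans RIGHT-to-left, buffering comma fragments until the colon part that owns them appears, emits each entry with a single join, reverses the output once, and rejects leftover fragments (where A raises IndexError) with a ValueError.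
import Mathlib
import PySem

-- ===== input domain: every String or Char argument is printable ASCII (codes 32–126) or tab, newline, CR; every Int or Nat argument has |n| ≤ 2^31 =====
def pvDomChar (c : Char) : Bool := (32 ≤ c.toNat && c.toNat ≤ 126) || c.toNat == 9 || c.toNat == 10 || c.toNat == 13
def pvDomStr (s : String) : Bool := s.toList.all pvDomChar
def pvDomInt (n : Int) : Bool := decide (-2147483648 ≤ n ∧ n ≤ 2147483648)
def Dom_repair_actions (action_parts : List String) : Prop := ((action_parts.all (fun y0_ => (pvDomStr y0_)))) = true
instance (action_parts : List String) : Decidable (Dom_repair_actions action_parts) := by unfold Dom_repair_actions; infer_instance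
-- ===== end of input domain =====

-- B replaces A's forward scan with in-place patching of the last entry by a RIGHT-to-left pass
-- that buffers comma fragments and emits each entry with one join (alternative decomposition);
-- return values agree on every input where A returns (Pre_ below).

-- ===== PORT A =====
-- literal port of A: forward fold over the parts, patching the last accumulated entry in place
def repair_actions (action_parts : List String) : List String :=
  action_parts.foldl (fun repaired part =>
    let temp := (PySem.Str.split? part ":").getD []
    if temp.length < 2 then
      let size := repaired.length
      match PySem.List.pyGet? repaired ((size : Int) - 1) with
      | none => repaired   -- Python raises IndexError here; excluded by Pre_
      | some last =>
        PySem.List.pySetD repaired ((size : Int) - 1) (last ++ "," ++ temp.headD "")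
    else repaired ++ [part]) []

-- ===== PORT B =====
-- literal port of B: fold over the reversed list with state (result, pending);
-- a ':' part emits ",".join([part] + pending), others are prepended to pending;
-- finally the result list is reversed.  Python B raises ValueError when pending
-- is nonempty at the end (first fragment without ':'); excluded by Pre_ below.
def repair_actions_alt (action_parts : List String) : List String :=
  let st := action_parts.reverse.foldl
    (fun (st : List String × List String) part =>
      if PySem.Str.isIn ":" part then
        (st.1 ++ [PySem.Str.join "," (part :: st.2)], ([] : List String))
      else (st.1, part :: st.2)) ([], [])
  st.1.reverse

-- ===== PRECONDITION & SPEC =====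
-- Pre_ excludes exactly the inputs where A raises IndexError (a first fragment without ':'); B raises ValueError there.
def Pre_repair_actions (action_parts : List String) : Prop :=
  ∀ p ∈ action_parts.take 1, PySem.Str.isIn ":" p = true
instance (action_parts : List String) : Decidable (Pre_repair_actions action_parts) := by
  unfold Pre_repair_actions; infer_instance
def pvWitness_repair_actions : List String := ["a:1", "b", "c:2"]

def Spec_repair_actions (action_parts : List String) (out : List String) : Prop := out = repair_actions_alt action_parts
instance (action_parts : List String) (out : List String) : Decidable (Spec_repair_actions action_parts out) := by unfold Spec_repair_actions; infer_instance

-- ===== CLAIM (what is proved, stated in full; the proofs are below) =====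
def Claim_equal_repair_actions : Prop := ∀ (action_parts : List String), Dom_repair_actions action_parts → Pre_repair_actions action_parts → Spec_repair_actions action_parts (repair_actions action_parts)

-- ===== LEMMAS AND PROOFS =====

-- common reference semantics used by the proofs: the list of groups of fragments
def pvGFold (parts : List String) (gs : List (List String)) : List (List String) :=
  parts.foldl (fun gs part =>
    if PySem.Str.isIn ":" part then gs ++ [[part]]
    else match gs.getLast? with
      | none => gs
      | some g => gs.dropLast ++ [g ++ [part]]) gs

theorem pv_go_len_ge (sep : List Char) (fuel : Nat) (l cur : List Char) (acc : List (List Char)) :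
    acc.length + 1 ≤ (PySem.Chars.splitOn.go sep fuel l cur acc).length := by
  induction fuel generalizing l cur acc with
  | zero => simp [PySem.Chars.splitOn.go]
  | succ n ih =>
    cases l with
    | nil => simp [PySem.Chars.splitOn.go]
    | cons c rest =>
      rw [PySem.Chars.splitOn.go]
      split
      · have := ih (List.drop sep.length (c :: rest)) [] (cur.reverse :: acc)
        simp at this; omega
      · exact ih rest (c :: cur) acc

theorem pv_go_not_infix (sep : List Char) (fuel : Nat) (l cur : List Char) (acc : List (List Char))
    (hf : l.length < fuel) (h : ¬ sep <:+: l) :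
    PySem.Chars.splitOn.go sep fuel l cur acc = acc.reverse ++ [cur.reverse ++ l] := by
  induction fuel generalizing l cur acc with
  | zero => omega
  | succ n ih =>
    cases l with
    | nil => simp [PySem.Chars.splitOn.go]
    | cons c rest =>
      rw [PySem.Chars.splitOn.go]
      split
      · exact absurd ((List.isPrefixOf_iff_prefix.mp (by assumption)).isInfix) h
      · rw [ih rest (c :: cur) acc (by simp at hf ⊢; omega)
          (fun hi => h (List.infix_cons_iff.mpr (Or.inr hi)))]
        simp

theorem pv_go_infix_len (sep : List Char) (hsep : sep ≠ []) (fuel : Nat) (l cur : List Char)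
    (acc : List (List Char)) (hf : l.length < fuel) (h : sep <:+: l) :
    acc.length + 2 ≤ (PySem.Chars.splitOn.go sep fuel l cur acc).length := by
  induction fuel generalizing l cur acc with
  | zero => omega
  | succ n ih =>
    cases l with
    | nil => exact absurd (List.eq_nil_of_infix_nil h) hsep
    | cons c rest =>
      rw [PySem.Chars.splitOn.go]
      split
      · have := pv_go_len_ge sep n (List.drop sep.length (c :: rest)) [] (cur.reverse :: acc)
        simp at this; omega
      · rcases List.infix_cons_iff.mp h with hp | hi
        · exact absurd ((List.isPrefixOf_iff_prefix.mpr hp)) (by assumption)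
        · exact ih rest (c :: cur) acc (by simp at hf ⊢; omega) hi

theorem pv_splitOn_of_not_infix (sep l : List Char) (h : ¬ sep <:+: l) :
    PySem.Chars.splitOn l sep = [l] := by
  rw [PySem.Chars.splitOn, pv_go_not_infix sep (l.length+1) l [] [] (by omega) h]
  simp

theorem pv_splitOn_len_lt_iff (sep l : List Char) (hsep : sep ≠ []) :
    (PySem.Chars.splitOn l sep).length < 2 ↔ ¬ sep <:+: l := by
  constructor
  · intro hlen hi
    have := pv_go_infix_len sep hsep (l.length+1) l [] [] (by omega) hi
    rw [PySem.Chars.splitOn] at hlen; simp at this; omega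
  · intro h; rw [pv_splitOn_of_not_infix sep l h]; simp

theorem pv_set_last {α : Type} (xs : List α) (v : α) (h : xs ≠ []) :
    xs.set (xs.length - 1) v = xs.dropLast ++ [v] := by
  induction xs with
  | nil => simp at h
  | cons a t ih =>
    cases t with
    | nil => simp
    | cons b t' =>
      have := ih (by simp)
      simpa using this

theorem pv_join_singleton (p : String) : PySem.Str.join "," [p] = p := by
  simp [PySem.Str.join, PySem.Chars.join, List.intercalate]

theorem pv_chars_join_append (sep : List Char) (gs : List (List Char)) (hg : gs ≠ []) (q : List Char) :
    PySem.Chars.join sep (gs ++ [q]) = PySem.Chars.join sep gs ++ sep ++ q := by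
  induction gs with
  | nil => simp at hg
  | cons a t ih =>
    cases t with
    | nil => simp [PySem.Chars.join, List.intercalate, List.intersperse]
    | cons b t' =>
      have h2 := ih (by simp)
      simp only [PySem.Chars.join, List.intercalate] at h2 ⊢
      simp only [List.cons_append, List.intersperse_cons₂, List.flatten_cons] at h2 ⊢
      simp [h2]

theorem pv_join_append (g : List String) (hg : g ≠ []) (p : String) :
    PySem.Str.join "," (g ++ [p]) = PySem.Str.join "," g ++ "," ++ p := by
  have h := pv_chars_join_append [','] (g.map String.toList) (by simpa using hg) p.toList
  apply String.toList_inj.mp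
  simp [PySem.Str.join, h]

theorem pv_cond_true (part : String) (hc : PySem.Str.isIn ":" part = true) :
    ¬ ((PySem.Str.split? part ":").getD []).length < 2 := by
  have hinf : [':'] <:+: part.toList := by
    rw [PySem.Str.isIn] at hc
    have := (PySem.Chars.isIn_iff_infix _ _).mp hc
    simpa using this
  have := (pv_splitOn_len_lt_iff [':'] part.toList (by simp)).not.mpr (by simpa using hinf)
  simp only [PySem.Str.split?, PySem.Chars.split?] at *
  simpa using this

theorem pv_cond_false (part : String) (hc : ¬ PySem.Str.isIn ":" part = true) :
    (PySem.Str.split? part ":").getD [] = [part] := by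
  have hinf : ¬ [':'] <:+: part.toList := by
    intro h
    rw [PySem.Str.isIn] at hc
    exact hc ((PySem.Chars.isIn_iff_infix _ _).mpr (by simpa using h))
  have := pv_splitOn_of_not_infix [':'] part.toList hinf
  simp only [PySem.Str.split?, PySem.Chars.split?]
  simp [this]

-- A's fold computes the joined groups (A-side invariant)
theorem pv_invariant (parts : List String) (groups : List (List String))
    (hg : groups ≠ []) (hne : ∀ g ∈ groups, g ≠ []) :
    parts.foldl (fun repaired part =>
      let temp := (PySem.Str.split? part ":").getD []
      if temp.length < 2 then
        let size := repaired.length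
        match PySem.List.pyGet? repaired ((size : Int) - 1) with
        | none => repaired
        | some last =>
          PySem.List.pySetD repaired ((size : Int) - 1) (last ++ "," ++ temp.headD "")
      else repaired ++ [part]) (groups.map (fun g => PySem.Str.join "," g))
    = (pvGFold parts groups).map (fun g => PySem.Str.join "," g) := by
  induction parts generalizing groups with
  | nil => rfl
  | cons part rest ih =>
    simp only [pvGFold, List.foldl_cons] at *
    by_cases hc : PySem.Str.isIn ":" part = true
    · rw [if_pos hc]
      have h1 := pv_cond_true part hc
      rw [if_neg h1]
      have : (groups.map (fun g => PySem.Str.join "," g)) ++ [part]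
           = (groups ++ [[part]]).map (fun g => PySem.Str.join "," g) := by
        simp [pv_join_singleton]
      rw [this, ih (groups ++ [[part]]) (by simp) (by intro g hgmem; rcases List.mem_append.mp hgmem with h | h; exact hne g h; simp at h; simp [h])]
    · rw [if_neg hc]
      have h1 := pv_cond_false part hc
      rw [h1]
      obtain ⟨gs', g, rfl⟩ := (List.eq_nil_or_concat groups).resolve_left hg
      simp only [List.concat_eq_append] at hne ⊢
      have hne' : g ≠ [] := hne g (by simp)
      rw [if_pos (by simp : ([part] : List String).length < 2)]
      have hlen : ((gs' ++ [g]).map (fun g => PySem.Str.join "," g)).length = gs'.length + 1 := by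
        simp
      have hidx : ((((gs' ++ [g]).map (fun g => PySem.Str.join "," g)).length : Int) - 1)
          = ((gs'.length : Nat) : Int) := by
        rw [hlen]; push_cast; ring
      have hget : PySem.List.pyGet? ((gs' ++ [g]).map (fun g => PySem.Str.join "," g)) ((gs'.length : Nat) : Int)
          = some (PySem.Str.join "," g) := by
        rw [PySem.List.pyGet?_natCast]
        simp
      have hglast : (gs' ++ [g]).getLast? = some g := by simp
      simp only [hidx, hget, hglast]
      rw [PySem.List.pySetD_natCast]
      have hset : ((gs' ++ [g]).map (fun g => PySem.Str.join "," g)).set gs'.length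
            (PySem.Str.join "," g ++ "," ++ ([part].headD ""))
          = ((gs' ++ [g ++ [part]]).map (fun g => PySem.Str.join "," g)) := by
        have hs := pv_set_last ((gs' ++ [g]).map (fun g => PySem.Str.join "," g))
          (PySem.Str.join "," g ++ "," ++ part) (by simp)
        rw [hlen] at hs
        simp only [Nat.add_sub_cancel] at hs
        simp only [List.headD]
        rw [hs]
        simp [pv_join_append g hne' part]
      rw [hset]
      rw [ih (gs' ++ [g ++ [part]]) (by simp)
        (by intro x hx
            rcases List.mem_append.mp hx with h | h
            · exact hne x (by simp [h])
            · simp at h; simp [h])]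
      simp

-- pvGFold distributes over an untouched group prefix
theorem pv_gfold_append (qs : List String) (gs1 gs2 : List (List String)) (h2 : gs2 ≠ []) :
    pvGFold qs (gs1 ++ gs2) = gs1 ++ pvGFold qs gs2 := by
  induction qs generalizing gs2 with
  | nil => simp [pvGFold]
  | cons q rest ih =>
    simp only [pvGFold, List.foldl_cons] at *
    by_cases hc : PySem.Str.isIn ":" q = true
    · rw [if_pos hc, if_pos hc, List.append_assoc]
      exact ih (gs2 ++ [[q]]) (by simp)
    · rw [if_neg hc, if_neg hc]
      obtain ⟨g2', g, rfl⟩ := (List.eq_nil_or_concat gs2).resolve_left h2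
      simp only [List.concat_eq_append]
      have hl1 : (gs1 ++ (g2' ++ [g])).getLast? = some g := by
        rw [← List.append_assoc]; simp
      have hl2 : (g2' ++ [g]).getLast? = some g := by simp
      rw [hl1, hl2]
      have hd : (gs1 ++ (g2' ++ [g])).dropLast = gs1 ++ g2' := by
        rw [← List.append_assoc, List.dropLast_append_of_ne_nil (by simp)]
        simp
      rw [hd, List.dropLast_append_of_ne_nil (by simp)]
      simp only [show ∀ (x : List String), [x].dropLast = [] from fun _ => rfl, List.append_nil, List.append_assoc]
      exact ih (g2' ++ [g ++ [q]]) (by simp)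

-- a colon-less prefix only extends the last group
theorem pv_gfold_prefix (pre : List String) (hpre : ∀ p ∈ pre, PySem.Str.isIn ":" p = false) :
    ∀ (rest : List String) (gs0 : List (List String)) (g : List String),
    pvGFold (pre ++ rest) (gs0 ++ [g]) = pvGFold rest (gs0 ++ [g ++ pre]) := by
  induction pre with
  | nil => intro rest gs0 g; simp
  | cons p pre' ih =>
    intro rest gs0 g
    have hp : PySem.Str.isIn ":" p = false := hpre p (by simp)
    have hp' : PySem.Chars.isIn [':'] p.toList = false := by
      rw [PySem.Str.isIn] at hp; simpa using hp
    simp only [List.cons_append, pvGFold, List.foldl_cons]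
    rw [if_neg (by simp [hp'])]
    have hl : (gs0 ++ [g]).getLast? = some g := by simp
    rw [hl, List.dropLast_append_of_ne_nil (by simp)]
    simp only [show ∀ (x : List String), [x].dropLast = [] from fun _ => rfl, List.append_nil]
    have := ih (fun q hq => hpre q (by simp [hq])) rest gs0 (g ++ [p])
    simp only [pvGFold] at this ⊢
    rw [this, List.append_assoc]
    simp

-- B-side invariant: the right-to-left fold computes (reversed joined groups, pending prefix)
theorem pv_bfold (ps : List String) :
    ps.foldr (fun part (st : List String × List String) =>
      if PySem.Str.isIn ":" part then
        (st.1 ++ [PySem.Str.join "," (part :: st.2)], ([] : List String))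
      else (st.1, part :: st.2)) ([], [])
    = (((pvGFold (ps.dropWhile (fun p => !PySem.Str.isIn ":" p)) []).map
          (fun g => PySem.Str.join "," g)).reverse,
       ps.takeWhile (fun p => !PySem.Str.isIn ":" p)) := by
  induction ps with
  | nil => simp [pvGFold]
  | cons p rest ih =>
    simp only [List.foldr_cons, ih]
    by_cases hc : PySem.Str.isIn ":" p = true
    · rw [if_pos hc]
      have hc' : PySem.Chars.isIn [':'] p.toList = true := by
        rw [PySem.Str.isIn] at hc; simpa using hc
      have htw : (p :: rest).takeWhile (fun p => !PySem.Str.isIn ":" p) = [] := by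
        simp [hc']
      have hdw : (p :: rest).dropWhile (fun p => !PySem.Str.isIn ":" p) = p :: rest := by
        simp [hc']
      rw [htw, hdw]
      -- unfold one step of pvGFold on p :: rest
      have h1 : pvGFold (p :: rest) [] = pvGFold rest [[p]] := by
        simp [pvGFold, hc']
      have hsplit : rest = rest.takeWhile (fun p => !PySem.Str.isIn ":" p)
            ++ rest.dropWhile (fun p => !PySem.Str.isIn ":" p) :=
        (List.takeWhile_append_dropWhile).symm
      have hmem : ∀ q ∈ rest.takeWhile (fun p => !PySem.Str.isIn ":" p),
          PySem.Str.isIn ":" q = false := by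
        intro q hq
        have := List.mem_takeWhile_imp hq
        simpa using this
      have h2 : pvGFold rest [[p]]
          = pvGFold (rest.dropWhile (fun p => !PySem.Str.isIn ":" p))
              [p :: rest.takeWhile (fun p => !PySem.Str.isIn ":" p)] := by
        conv_lhs => rw [hsplit]
        have := pv_gfold_prefix (rest.takeWhile (fun p => !PySem.Str.isIn ":" p)) hmem
          (rest.dropWhile (fun p => !PySem.Str.isIn ":" p)) [] [p]
        simpa using this
      have h3 : pvGFold (rest.dropWhile (fun p => !PySem.Str.isIn ":" p))
              [p :: rest.takeWhile (fun p => !PySem.Str.isIn ":" p)]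
          = [p :: rest.takeWhile (fun p => !PySem.Str.isIn ":" p)]
            ++ pvGFold (rest.dropWhile (fun p => !PySem.Str.isIn ":" p)) [] := by
        cases hq : rest.dropWhile (fun p => !PySem.Str.isIn ":" p) with
        | nil => simp [pvGFold]
        | cons q qs =>
          have hqc : PySem.Str.isIn ":" q = true := by
            have := List.head?_dropWhile_not (fun p => !PySem.Str.isIn ":" p) rest
            rw [hq] at this
            simpa using this
          simp only [pvGFold, List.foldl_cons, if_pos hqc]
          have := pv_gfold_append qs [p :: rest.takeWhile (fun p => !PySem.Str.isIn ":" p)]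
            [[q]] (by simp)
          simp only [pvGFold] at this ⊢
          simpa using this
      rw [h1, h2, h3]
      simp
    · rw [if_neg hc]
      have hc' : PySem.Chars.isIn [':'] p.toList = false := by
        rw [PySem.Str.isIn] at hc; simpa using Bool.of_not_eq_true hc
      have htw : (p :: rest).takeWhile (fun p => !PySem.Str.isIn ":" p)
          = p :: rest.takeWhile (fun p => !PySem.Str.isIn ":" p) := by
        simp [hc']
      have hdw : (p :: rest).dropWhile (fun p => !PySem.Str.isIn ":" p)
          = rest.dropWhile (fun p => !PySem.Str.isIn ":" p) := by
        simp [hc']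
      rw [htw, hdw]

-- ===== VERDICT (by name: the statement is the Claim_ definition above) =====
theorem repair_actions_spec : Claim_equal_repair_actions := by
  unfold Claim_equal_repair_actions
  intro ps hdom hpre
  unfold Spec_repair_actions repair_actions repair_actions_alt
  -- B side: rewrite the reverse-foldl as a foldr and apply the B invariant
  rw [List.foldl_reverse, pv_bfold ps]
  cases ps with
  | nil => simp [pvGFold]
  | cons p rest =>
    have hp : PySem.Str.isIn ":" p = true := hpre p (by simp)
    have hp' : PySem.Chars.isIn [':'] p.toList = true := by
      rw [PySem.Str.isIn] at hp; simpa using hp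
    have hdw : (p :: rest).dropWhile (fun p => !PySem.Str.isIn ":" p) = p :: rest := by
      simp [hp']
    rw [hdw]
    simp only [List.reverse_reverse]
    -- A side: first step emits [p], then the A invariant
    simp only [List.foldl_cons]
    rw [if_neg (pv_cond_true p hp)]
    have hstart : ([] : List String) ++ [p] = ([[p]].map (fun g => PySem.Str.join "," g)) := by
      simp [pv_join_singleton]
    rw [hstart, pv_invariant rest [[p]] (by simp) (by simp)]
    have : pvGFold (p :: rest) [] = pvGFold rest [[p]] := by simp [pvGFold, hp']
    rw [this]
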